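-- pv_equiv track=rewrite | github.com/Mukku27/Inventory-Management-Using-GenAI | guardrails.py | _has_top_level_comma_join
-- ===== SOURCE A (Python) =====
-- def _matches_keyword(sql: str, start: int, keyword: str) -> bool:
--     end = start + len(keyword)
--     return (
--         sql.startswith(keyword, start)
--         and (start == 0 or not (sql[start - 1].isalnum() or sql[start - 1] == "_"))
--         and (end == len(sql) or not (sql[end].isalnum() or sql[end] == "_"))
--     )
--
-- def _has_top_level_comma_join(sql: str) -> bool:
--     clause_boundaries = (
--         "WHERE",
--         "GROUP",
--         "ORDER",
--         "LIMIT",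
--         "UNION",
--         "EXCEPT",
--         "INTERSECT",
--         "HAVING",
--         "WINDOW",
--     )
--     depth = 0
--     in_from_clause = False
--     index = 0
--
--     while index < len(sql):
--         char = sql[index]
--         if char == "(":
--             depth += 1
--             index += 1
--             continue
--         if char == ")":
--             depth = max(depth - 1, 0)
--             index += 1
--             continue
--
--         if depth == 0:
--             matched_boundary = next(
--                 (keyword for keyword in clause_boundaries if _matches_keyword(sql, index, keyword)),
--                 None,
--             )
--             if matched_boundary is not None:
--                 in_from_clause = False
--                 index += len(matched_boundary)
--                 continue
--             if _matches_keyword(sql, index, "FROM") or _matches_keyword(sql, index, "JOIN"):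
--                 in_from_clause = True
--                 index += 4
--                 continue
--             if in_from_clause and char == ",":
--                 return True
--
--         index += 1
--
--     return False
-- ===== SOURCE B (Python) =====
-- def _has_top_level_comma_join(sql: str) -> bool:
--     # Pass 1: tokenize into maximal word-character runs and single-char tokens.
--     tokens = []
--     i = 0
--     n = len(sql)
--     while i < n:
--         c = sql[i]
--         if c.isalnum() or c == "_":
--             j = i
--             while j < n and (sql[j].isalnum() or sql[j] == "_"):
--                 j += 1
--             tokens.append(sql[i:j])
--             i = j
--         else:
--             tokens.append(c)
--             i += 1
--     # Pass 2: single scan over tokens.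
--     boundaries = {"WHERE", "GROUP", "ORDER", "LIMIT", "UNION",
--                   "EXCEPT", "INTERSECT", "HAVING", "WINDOW"}
--     depth = 0
--     in_from = False
--     for tok in tokens:
--         if tok == "(":
--             depth += 1
--         elif tok == ")":
--             depth = max(depth - 1, 0)
--         elif depth == 0:
--             if tok in boundaries:
--                 in_from = False
--             elif tok == "FROM" or tok == "JOIN":
--                 in_from = True
--             elif in_from and tok == ",":
--                 return True
--     return False
-- ===== Notes on version B (the rewrite author's own statement) =====
-- stated objective: faster
-- what changed: Replaced the per-character scan that tries up to 11 boundary-checked startswith keyword matches at every top-level position with a two-pass design: tokenize once into maximal word runs and single-char tokens, then a single token scan with set membership for the boundary keywords.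
import Mathlib
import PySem

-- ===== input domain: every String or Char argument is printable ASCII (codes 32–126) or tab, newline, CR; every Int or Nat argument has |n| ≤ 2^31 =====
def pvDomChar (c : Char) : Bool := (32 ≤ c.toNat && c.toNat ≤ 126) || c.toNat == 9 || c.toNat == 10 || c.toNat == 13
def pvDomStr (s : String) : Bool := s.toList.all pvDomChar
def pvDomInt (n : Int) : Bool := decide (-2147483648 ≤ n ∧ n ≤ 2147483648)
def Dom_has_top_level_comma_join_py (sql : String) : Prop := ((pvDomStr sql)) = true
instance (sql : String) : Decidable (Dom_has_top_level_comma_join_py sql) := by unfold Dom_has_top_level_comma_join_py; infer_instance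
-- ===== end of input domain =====

-- B replaces A's per-character scan (which probes up to 11 boundary-checked keyword matches
-- at every top-level position) by a tokenize-once pass followed by a single scan over tokens;
-- measurably faster by a constant factor.

-- ===== PORT A =====

-- Python's `c.isalnum() or c == "_"` (exact on the ASCII domain).
def pvWordC (c : Char) : Bool := PySem.Chars.isalnum c || c == '_'

def aBoundaries : List (List Char) :=
  ["WHERE".toList, "GROUP".toList, "ORDER".toList, "LIMIT".toList, "UNION".toList,
   "EXCEPT".toList, "INTERSECT".toList, "HAVING".toList, "WINDOW".toList]

-- _matches_keyword; the getD indices are in range at every call site, so getD is exact.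
def pvMatchesKeyword (s : List Char) (start : Nat) (kw : List Char) : Bool :=
  kw.isPrefixOf (s.drop start)
  && (start == 0 || !(pvWordC (s.getD (start - 1) ' ')))
  && (start + kw.length == s.length || !(pvWordC (s.getD (start + kw.length) ' ')))

-- the while loop of _has_top_level_comma_join, state (index, depth, in_from_clause)
def aLoop (s : List Char) (index : Nat) (depth : Int) (inFrom : Bool) : Bool :=
  if h : index < s.length then
    if s.getD index ' ' = '(' then aLoop s (index + 1) (depth + 1) inFrom
    else if s.getD index ' ' = ')' then aLoop s (index + 1) (max (depth - 1) 0) inFrom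
    else if depth = 0 then
      match hfind : aBoundaries.find? (fun kw => pvMatchesKeyword s index kw) with
      | some kw => aLoop s (index + kw.length) depth false
      | none =>
        if pvMatchesKeyword s index "FROM".toList || pvMatchesKeyword s index "JOIN".toList then
          aLoop s (index + 4) depth true
        else if inFrom = true ∧ s.getD index ' ' = ',' then true
        else aLoop s (index + 1) depth inFrom
    else aLoop s (index + 1) depth inFrom
  else false
termination_by s.length - index
decreasing_by
  · omega
  · omega
  · have hm := List.mem_of_find?_eq_some hfind
    have hlen : 1 ≤ kw.length := by
      have : ∀ k ∈ aBoundaries, 1 ≤ k.length := by decide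
      exact this kw hm
    omega
  · omega
  · omega
  · omega

def has_top_level_comma_join_py (sql : String) : Bool := aLoop sql.toList 0 0 false

-- ===== PORT B =====

def bBoundaries : List (List Char) :=
  ["WHERE".toList, "GROUP".toList, "ORDER".toList, "LIMIT".toList, "UNION".toList,
   "EXCEPT".toList, "INTERSECT".toList, "HAVING".toList, "WINDOW".toList]

-- pass 1: maximal word-character runs become word tokens, everything else single-char tokens
def tokenizeB : List Char → List (List Char)
  | [] => []
  | c :: rest =>
    if hw : pvWordC c = true then
      ((c :: rest).takeWhile pvWordC) :: tokenizeB ((c :: rest).dropWhile pvWordC)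
    else
      [c] :: tokenizeB rest
termination_by l => l.length
decreasing_by
  · simp only [List.dropWhile_cons, hw, if_true]
    exact Nat.lt_succ_of_le (List.length_dropWhile_le _ _)
  · simp

-- pass 2: single scan over the tokens
def bScan : List (List Char) → Int → Bool → Bool
  | [], _, _ => false
  | t :: ts, depth, inFrom =>
    if t = ['('] then bScan ts (depth + 1) inFrom
    else if t = [')'] then bScan ts (max (depth - 1) 0) inFrom
    else if depth = 0 then
      if t ∈ bBoundaries then bScan ts depth false
      else if t = "FROM".toList ∨ t = "JOIN".toList then bScan ts depth true
      else if inFrom = true ∧ t = [','] then true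
      else bScan ts depth inFrom
    else bScan ts depth inFrom

def has_top_level_comma_join_py_alt (sql : String) : Bool :=
  bScan (tokenizeB sql.toList) 0 false

-- ===== PRECONDITION & SPEC =====
def Spec_has_top_level_comma_join_py (sql : String) (out : Bool) : Prop := out = has_top_level_comma_join_py_alt sql
instance (sql : String) (out : Bool) : Decidable (Spec_has_top_level_comma_join_py sql out) := by unfold Spec_has_top_level_comma_join_py; infer_instance

-- ===== CLAIM (what is proved, stated in full; the proofs are below) =====
def Claim_equal_has_top_level_comma_join_py : Prop := ∀ (sql : String), Dom_has_top_level_comma_join_py sql → Spec_has_top_level_comma_join_py sql (has_top_level_comma_join_py sql)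

-- ===== LEMMAS AND PROOFS =====

lemma getD_drop (s : List Char) (i k : Nat) (d : Char) :
    (s.drop i).getD k d = s.getD (i + k) d := by
  simp [List.getD_eq_getElem?_getD, List.getElem?_drop]

-- a keyword probe with a word character immediately before it fails
lemma matches_false_of_prev_word (s : List Char) (i : Nat) (kw : List Char)
    (h0 : i ≠ 0) (hp : pvWordC (s.getD (i - 1) ' ') = true) :
    pvMatchesKeyword s i kw = false := by
  unfold pvMatchesKeyword
  rw [hp]
  simp [h0]

-- a keyword probe at a non-word character fails (keywords start with a word character)
lemma matches_false_of_nonword (s : List Char) (i : Nat) (c : Char) (t : List Char)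
    (hl : s.drop i = c :: t) (hc : pvWordC c = false) (kw : List Char)
    (hkw : kw.head?.elim false pvWordC = true) :
    pvMatchesKeyword s i kw = false := by
  cases kw with
  | nil => simp at hkw
  | cons k kt =>
    simp only [List.head?, Option.elim] at hkw
    have hpre : (k :: kt).isPrefixOf (c :: t) = false := by
      cases hb : (k :: kt).isPrefixOf (c :: t)
      · rfl
      · rcases List.cons_prefix_cons.mp (List.isPrefixOf_iff_prefix.mp hb) with ⟨rfl, -⟩
        rw [hkw] at hc; cases hc
    simp [pvMatchesKeyword, hl, hpre]

lemma takeWhile_char (kw : List Char) : ∀ (l : List Char),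
    (∀ c ∈ kw, pvWordC c = true) →
    ((kw.isPrefixOf l && (kw.length == l.length || !(pvWordC (l.getD kw.length ' ')))) =
      (l.takeWhile pvWordC == kw)) := by
  induction kw with
  | nil =>
    intro l _
    cases l with
    | nil => simp
    | cons c t =>
      cases hpc : pvWordC c <;> simp [List.takeWhile_cons, hpc, List.isPrefixOf]
  | cons k kt ih =>
    intro l hall
    have hk : pvWordC k = true := hall k (by simp)
    have hkt : ∀ c ∈ kt, pvWordC c = true := fun c hc => hall c (by simp [hc])
    cases l with
    | nil => simp [List.isPrefixOf]
    | cons c t =>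
      by_cases hkc : k = c
      · subst hkc
        have hrec := ih t hkt
        simp only [List.getD_eq_getElem?_getD] at hrec
        simp [List.takeWhile_cons, hk, List.isPrefixOf, List.getD_eq_getElem?_getD, hrec]
      · have hbe : (k == c) = false := beq_eq_false_iff_ne.mpr hkc
        cases hpc : pvWordC c <;>
          simp [List.takeWhile_cons, hpc, List.isPrefixOf, hbe, Ne.symm hkc]

-- at a token start, a keyword probe is exactly equality of the current word token with kw
lemma matches_eq_takeWhile (s : List Char) (i : Nat) (kw : List Char)
    (hi : i < s.length)
    (hkw : ∀ c ∈ kw, pvWordC c = true)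
    (hprev : i = 0 ∨ pvWordC (s.getD (i - 1) ' ') = false) :
    pvMatchesKeyword s i kw = ((s.drop i).takeWhile pvWordC == kw) := by
  have hQ : (i == 0 || !(pvWordC (s.getD (i - 1) ' '))) = true := by
    rcases hprev with rfl | h
    · simp
    · rw [h]; simp
  have h1 : (i + kw.length == s.length) = (kw.length == (s.drop i).length) := by
    rw [Bool.eq_iff_iff]; simp only [beq_iff_eq]; rw [List.length_drop]; omega
  have h2 : s.getD (i + kw.length) ' ' = (s.drop i).getD kw.length ' ' :=
    (getD_drop s i kw.length ' ').symm
  unfold pvMatchesKeyword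
  rw [hQ, Bool.and_true, h1, h2]
  exact takeWhile_char kw (s.drop i) hkw

lemma find?_eq_mem (w : List Char) (L : List (List Char)) (p : List Char → Bool)
    (hp : ∀ kw ∈ L, p kw = (w == kw)) :
    L.find? p = if w ∈ L then some w else none := by
  induction L with
  | nil => simp
  | cons k t ih =>
    have hk := hp k (by simp)
    by_cases hwk : w = k
    · subst hwk; simp [List.find?_cons, hk]
    · have hbe : (w == k) = false := beq_eq_false_iff_ne.mpr hwk
      rw [hbe] at hk
      simp [List.find?_cons, hk, hwk, ih (fun kw hm => hp kw (by simp [hm]))]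

lemma dropWhile_head_false {p : Char → Bool} : ∀ (l : List Char) (c : Char) (t : List Char),
    l.dropWhile p = c :: t → p c = false := by
  intro l
  induction l with
  | nil => intro c t h; simp [List.dropWhile] at h
  | cons a l ih =>
    intro c t h
    rw [List.dropWhile_cons] at h
    by_cases hpa : p a = true
    · rw [if_pos hpa] at h; exact ih c t h
    · rw [if_neg hpa] at h
      rcases List.cons.injEq .. ▸ h with ⟨rfl, -⟩
      simpa using hpa

lemma word_ne_single (w : List Char) (hall : ∀ x ∈ w, pvWordC x = true)
    (c : Char) (hc : pvWordC c = false) : w ≠ [c] := by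
  intro h
  have := hall c (by simp [h])
  rw [this] at hc; cases hc

lemma walk_step (s : List Char) (i : Nat) (depth : Int) (f : Bool)
    (hi : i < s.length) (hw : pvWordC (s.getD i ' ') = true)
    (hc : depth ≠ 0 ∨ (i ≠ 0 ∧ pvWordC (s.getD (i - 1) ' ') = true)) :
    aLoop s i depth f = aLoop s (i + 1) depth f := by
  have hne1 : s.getD i ' ' ≠ '(' := by
    intro he; rw [he] at hw; exact absurd hw (by decide)
  have hne2 : s.getD i ' ' ≠ ')' := by
    intro he; rw [he] at hw; exact absurd hw (by decide)
  have hne3 : s.getD i ' ' ≠ ',' := by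
    intro he; rw [he] at hw; exact absurd hw (by decide)
  rw [aLoop, dif_pos hi, if_neg hne1, if_neg hne2]
  rcases hc with hd | ⟨h0, hp⟩
  · rw [if_neg hd]
  · by_cases hd : depth = 0
    · rw [if_pos hd]
      have hfind : aBoundaries.find? (fun kw => pvMatchesKeyword s i kw) = none :=
        List.find?_eq_none.mpr fun kw _ => by
          simp [matches_false_of_prev_word s i kw h0 hp]
      split
      · next kw hk => rw [hfind] at hk; cases hk
      · next hk =>
          rw [matches_false_of_prev_word s i _ h0 hp,
            matches_false_of_prev_word s i _ h0 hp]
          rw [if_neg (by simp), if_neg (fun h => hne3 h.2)]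
    · rw [if_neg hd]

lemma walk_many (m : Nat) : ∀ (s : List Char) (i : Nat) (depth : Int) (f : Bool),
    (∀ k, k < m → i + k < s.length ∧ pvWordC (s.getD (i + k) ' ') = true) →
    (depth ≠ 0 ∨ (i ≠ 0 ∧ pvWordC (s.getD (i - 1) ' ') = true)) →
    aLoop s i depth f = aLoop s (i + m) depth f := by
  induction m with
  | zero => intro s i depth f _ _; rfl
  | succ m ih =>
    intro s i depth f hpos hc
    have h0 := hpos 0 (by omega)
    rw [walk_step s i depth f (by simpa using h0.1) (by simpa using h0.2) hc]
    have := ih s (i + 1) depth f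
      (fun k hk => by
        have := hpos (k + 1) (by omega)
        constructor
        · omega
        · have hrw : i + 1 + k = i + (k + 1) := by omega
          rw [hrw]; exact this.2)
      (Or.inr ⟨by omega, by
        have hrw : i + 1 - 1 = i := by omega
        rw [hrw]; simpa using h0.2⟩)
    rw [this, show i + 1 + m = i + (m + 1) from by omega]

lemma ball_all_word (L : List (List Char))
    (h : L.all (fun kw => kw.all pvWordC) = true) :
    ∀ kw ∈ L, ∀ c ∈ kw, pvWordC c = true :=
  fun kw hkw c hc => List.all_eq_true.mp (List.all_eq_true.mp h kw hkw) c hc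

lemma aLoop_eq_bScan : ∀ (n : Nat) (s : List Char) (i : Nat) (depth : Int) (f : Bool),
    s.length - i ≤ n →
    (i = 0 ∨ pvWordC (s.getD (i - 1) ' ') = false ∨ pvWordC (s.getD i ' ') = false ∨ s.length ≤ i) →
    aLoop s i depth f = bScan (tokenizeB (s.drop i)) depth f := by
  intro n
  induction n with
  | zero =>
    intro s i depth f hn _
    have hge : s.length ≤ i := by omega
    rw [aLoop, dif_neg (by omega)]
    rw [List.drop_eq_nil_of_le hge]
    simp [tokenizeB, bScan]
  | succ n ih =>
    intro s i depth f hn hb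
    by_cases hi : i < s.length
    case neg =>
      rw [aLoop, dif_neg hi]
      rw [List.drop_eq_nil_of_le (by omega)]
      simp [tokenizeB, bScan]
    case pos =>
    have hl : s.drop i = s[i] :: s.drop (i + 1) := List.drop_eq_getElem_cons hi
    have hgd : s.getD i ' ' = s[i] := List.getD_eq_getElem s ' ' hi
    by_cases hw : pvWordC s[i] = true
    case neg =>
      -- current character is not a word character: a single-char token
      have hwb : pvWordC s[i] = false := by simpa using hw
      have htok : tokenizeB (s.drop i) = [s[i]] :: tokenizeB (s.drop (i + 1)) := by
        rw [hl, tokenizeB, dif_neg (by simp [hwb])]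
      have hb1 : (i + 1 = 0 ∨ pvWordC (s.getD (i + 1 - 1) ' ') = false ∨
          pvWordC (s.getD (i + 1) ' ') = false ∨ s.length ≤ i + 1) := by
        refine Or.inr (Or.inl ?_)
        rw [show i + 1 - 1 = i from by omega, hgd]; exact hwb
      have hn1 : s.length - (i + 1) ≤ n := by omega
      rw [htok, aLoop, dif_pos hi, hgd]
      by_cases hp1 : s[i] = '('
      · rw [if_pos hp1, bScan, if_pos (by rw [hp1])]
        exact ih s (i + 1) (depth + 1) f hn1 hb1
      · by_cases hp2 : s[i] = ')'
        · rw [if_neg hp1, if_pos hp2, bScan, if_neg (by simp [hp1]), if_pos (by rw [hp2])]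
          exact ih s (i + 1) (max (depth - 1) 0) f hn1 hb1
        · rw [if_neg hp1, if_neg hp2]
          by_cases hd : depth = 0
          case neg =>
            rw [if_neg hd, bScan, if_neg (by simp [hp1]), if_neg (by simp [hp2]), if_neg hd]
            exact ih s (i + 1) depth f hn1 hb1
          case pos =>
            subst hd
            rw [if_pos rfl]
            have hHeads : ∀ kw ∈ aBoundaries, kw.head?.elim false pvWordC = true := by
              have h : aBoundaries.all (fun kw => kw.head?.elim false pvWordC) = true := by decide
              exact fun kw hkw => List.all_eq_true.mp h kw hkw
            have hfind : aBoundaries.find? (fun kw => pvMatchesKeyword s i kw) = none :=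
              List.find?_eq_none.mpr fun kw hm => by
                simp [matches_false_of_nonword s i s[i] (s.drop (i + 1)) hl hwb kw (hHeads kw hm)]
            have hmem1 : [s[i]] ∉ bBoundaries := by
              intro hmem
              have h5 : ∀ kw ∈ bBoundaries, kw.length ≠ 1 := by decide
              exact h5 _ hmem rfl
            have hfj1 : ¬([s[i]] = "FROM".toList ∨ [s[i]] = "JOIN".toList) := by
              rintro (h | h) <;>
                · have := congrArg List.length h
                  simp at this
            split
            · next kw hk => rw [hfind] at hk; cases hk
            · next hk =>
              rw [matches_false_of_nonword s i s[i] (s.drop (i + 1)) hl hwb _ (by decide),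
                matches_false_of_nonword s i s[i] (s.drop (i + 1)) hl hwb _ (by decide),
                if_neg (by simp)]
              by_cases hcm : f = true ∧ s[i] = ','
              · rw [if_pos hcm, bScan, if_neg (by simp [hp1]), if_neg (by simp [hp2]),
                  if_pos rfl, if_neg hmem1, if_neg hfj1,
                  if_pos ⟨hcm.1, by rw [hcm.2]⟩]
              · rw [if_neg hcm, bScan, if_neg (by simp [hp1]), if_neg (by simp [hp2]),
                  if_pos rfl, if_neg hmem1, if_neg hfj1,
                  if_neg (fun h => hcm ⟨h.1, by injection h.2⟩)]
                exact ih s (i + 1) 0 f hn1 hb1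
    case pos =>
      -- current character starts a maximal word token w
      have hwcons : (s.drop i).takeWhile pvWordC =
          s[i] :: (s.drop (i + 1)).takeWhile pvWordC := by
        rw [hl, List.takeWhile_cons, if_pos hw]
      set w := (s.drop i).takeWhile pvWordC with hwdef
      have hw1 : 1 ≤ w.length := by rw [hwcons]; simp
      have hall : ∀ x ∈ w, pvWordC x = true := fun x hx => List.mem_takeWhile_imp hx
      have happ : w ++ (s.drop i).dropWhile pvWordC = s.drop i :=
        List.takeWhile_append_dropWhile
      have hwle : i + w.length ≤ s.length := by
        have h1 : w.length ≤ (s.drop i).length := by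
          conv_rhs => rw [← happ]
          simp
        rw [List.length_drop] at h1; omega
      have hld : (s.drop i).dropWhile pvWordC = s.drop (i + w.length) := by
        calc (s.drop i).dropWhile pvWordC
            = (w ++ (s.drop i).dropWhile pvWordC).drop w.length := by simp
          _ = (s.drop i).drop w.length := by rw [happ]
          _ = s.drop (i + w.length) := by rw [List.drop_drop]
      have htok : tokenizeB (s.drop i) = w :: tokenizeB (s.drop (i + w.length)) := by
        conv_lhs => rw [hl, tokenizeB]
        rw [dif_pos hw]
        rw [← hl, ← hwdef, hld]
      have word_pos : ∀ k, k < w.length →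
          i + k < s.length ∧ pvWordC (s.getD (i + k) ' ') = true := by
        intro k hk
        refine ⟨by omega, ?_⟩
        rw [← getD_drop s i k ' ']
        have hg : (s.drop i).getD k ' ' = w.getD k ' ' := by
          conv_lhs => rw [← happ]
          simp [List.getD_eq_getElem?_getD, List.getElem?_append_left hk]
        rw [hg]
        rw [List.getD_eq_getElem w ' ' hk]
        exact hall _ (List.getElem_mem hk)
      have hnext : (i + w.length = 0 ∨ pvWordC (s.getD (i + w.length - 1) ' ') = false ∨
          pvWordC (s.getD (i + w.length) ' ') = false ∨ s.length ≤ i + w.length) := by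
        by_cases hlt : i + w.length < s.length
        · refine Or.inr (Or.inr (Or.inl ?_))
          have hne : s.drop (i + w.length) ≠ [] := by
            intro h
            have := congrArg List.length h
            rw [List.length_drop] at this
            simp at this; omega
          obtain ⟨c', t', hct⟩ : ∃ c' t', s.drop (i + w.length) = c' :: t' := by
            cases h : s.drop (i + w.length) with
            | nil => exact absurd h hne
            | cons a b => exact ⟨a, b, rfl⟩
          have hcf : pvWordC c' = false :=
            dropWhile_head_false (s.drop i) c' t' (by rw [hld, hct])
          have : s.getD (i + w.length) ' ' = c' := by
            rw [← Nat.add_zero (i + w.length), ← getD_drop, hct]; rfl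
          rw [this]; exact hcf
        · exact Or.inr (Or.inr (Or.inr (by omega)))
      have hmeas : s.length - (i + w.length) ≤ n := by omega
      have hprev : i = 0 ∨ pvWordC (s.getD (i - 1) ' ') = false := by
        rcases hb with h | h | h | h
        · exact Or.inl h
        · exact Or.inr h
        · rw [hgd, hw] at h; cases h
        · omega
      have hmatch : ∀ kw, (∀ c ∈ kw, pvWordC c = true) →
          pvMatchesKeyword s i kw = (w == kw) := fun kw hk =>
        matches_eq_takeWhile s i kw hi hk hprev
      have hnp1 : w ≠ ['('] := word_ne_single w hall '(' (by decide)
      have hnp2 : w ≠ [')'] := word_ne_single w hall ')' (by decide)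
      have hnp3 : w ≠ [','] := word_ne_single w hall ',' (by decide)
      rw [htok]
      by_cases hd : depth = 0
      case neg =>
        rw [walk_many w.length s i depth f word_pos (Or.inl hd)]
        rw [bScan, if_neg hnp1, if_neg hnp2, if_neg hd]
        exact ih s (i + w.length) depth f hmeas hnext
      case pos =>
        subst hd
        have hne1 : s.getD i ' ' ≠ '(' := by
          rw [hgd]; intro he; rw [he] at hw; exact absurd hw (by decide)
        have hne2 : s.getD i ' ' ≠ ')' := by
          rw [hgd]; intro he; rw [he] at hw; exact absurd hw (by decide)
        have hne3 : s.getD i ' ' ≠ ',' := by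
          rw [hgd]; intro he; rw [he] at hw; exact absurd hw (by decide)
        have hBall : ∀ kw ∈ aBoundaries, ∀ c ∈ kw, pvWordC c = true :=
          ball_all_word aBoundaries (by decide)
        have hfind : aBoundaries.find? (fun kw => pvMatchesKeyword s i kw) =
            (if w ∈ aBoundaries then some w else none) :=
          find?_eq_mem w aBoundaries _ (fun kw hm => hmatch kw (hBall kw hm))
        rw [aLoop, dif_pos hi, if_neg hne1, if_neg hne2, if_pos rfl]
        by_cases hmem : w ∈ aBoundaries
        · rw [if_pos hmem] at hfind
          split
          · next kw hk =>
              rw [hfind] at hk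
              injection hk with hk
              subst hk
              rw [bScan, if_neg hnp1, if_neg hnp2, if_pos rfl,
                if_pos (show w ∈ bBoundaries from hmem)]
              exact ih s (i + w.length) 0 false hmeas hnext
          · next hk => rw [hfind] at hk; cases hk
        · rw [if_neg hmem] at hfind
          split
          · next kw hk => rw [hfind] at hk; cases hk
          · next hk =>
            have hF := hmatch "FROM".toList
              (fun c hc => List.all_eq_true.mp (show "FROM".toList.all pvWordC = true by decide) c hc)
            have hJ := hmatch "JOIN".toList
              (fun c hc => List.all_eq_true.mp (show "JOIN".toList.all pvWordC = true by decide) c hc)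
            by_cases hfj : w = "FROM".toList ∨ w = "JOIN".toList
            · have hcond : (pvMatchesKeyword s i "FROM".toList ||
                  pvMatchesKeyword s i "JOIN".toList) = true := by
                rw [hF, hJ]; rcases hfj with h | h <;> rw [h] <;> simp
              have hlen4 : w.length = 4 := by rcases hfj with h | h <;> rw [h] <;> decide
              rw [if_pos hcond, show i + 4 = i + w.length from by omega]
              rw [bScan, if_neg hnp1, if_neg hnp2, if_pos rfl, if_neg
                (show w ∉ bBoundaries from hmem), if_pos hfj]
              exact ih s (i + w.length) 0 true hmeas hnext
            · have hc1 : w ≠ "FROM".toList := fun h => hfj (Or.inl h)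
              have hc2 : w ≠ "JOIN".toList := fun h => hfj (Or.inr h)
              have hcond : (pvMatchesKeyword s i "FROM".toList ||
                  pvMatchesKeyword s i "JOIN".toList) = false := by
                rw [hF, hJ, beq_eq_false_iff_ne.mpr hc1, beq_eq_false_iff_ne.mpr hc2]
                rfl
              rw [if_neg (by rw [hcond]; simp), if_neg (fun h => hne3 h.2)]
              have hwalk := walk_many (w.length - 1) s (i + 1) 0 f
                (fun k hk => by
                  have h2 := word_pos (k + 1) (by omega)
                  refine ⟨by omega, ?_⟩
                  rw [show i + 1 + k = i + (k + 1) from by omega]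
                  exact h2.2)
                (Or.inr ⟨by omega, by
                  rw [show i + 1 - 1 = i from by omega]
                  rw [hgd]; exact hw⟩)
              rw [hwalk, show i + 1 + (w.length - 1) = i + w.length from by omega]
              rw [bScan, if_neg hnp1, if_neg hnp2, if_pos rfl, if_neg
                (show w ∉ bBoundaries from hmem), if_neg hfj,
                if_neg (fun h => hnp3 h.2)]
              exact ih s (i + w.length) 0 f hmeas hnext

-- ===== VERDICT (by name: the statement is the Claim_ definition above) =====
theorem has_top_level_comma_join_py_spec : Claim_equal_has_top_level_comma_join_py := by
  intro sql _
  unfold Spec_has_top_level_comma_join_py has_top_level_comma_join_py has_top_level_comma_join_py_alt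
  have h := aLoop_eq_bScan sql.toList.length sql.toList 0 0 false (by omega) (Or.inl rfl)
  simpa using h
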